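-- pv_equiv track=rewrite | github.com/billy-starks/aoc2021 | 12/main.py | is_invalid_path
-- ===== SOURCE A (Python) =====
-- def is_invalid_path(path):
-- 	small_caves = set()
-- 	for node in path:
-- 		if str.islower(node):
-- 			if node in small_caves:
-- 				return True
-- 			else:
-- 				small_caves.add(node)
-- 	return False
-- ===== SOURCE B (Python) =====
-- def is_invalid_path(path):
-- 	smalls = sorted(n for n in path if str.islower(n))
-- 	return any(a == b for a, b in zip(smalls, smalls[1:]))
-- ===== Notes on version B (the rewrite author's own statement) =====
-- stated objective: alternative
-- what changed: Replaces A's incremental seen-set with early-return membership by a sort-then-adjacent-scan: sort the small caves and report a repeat iff some adjacent pair of the sorted list is equal; no set is used at all.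
import Mathlib
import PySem

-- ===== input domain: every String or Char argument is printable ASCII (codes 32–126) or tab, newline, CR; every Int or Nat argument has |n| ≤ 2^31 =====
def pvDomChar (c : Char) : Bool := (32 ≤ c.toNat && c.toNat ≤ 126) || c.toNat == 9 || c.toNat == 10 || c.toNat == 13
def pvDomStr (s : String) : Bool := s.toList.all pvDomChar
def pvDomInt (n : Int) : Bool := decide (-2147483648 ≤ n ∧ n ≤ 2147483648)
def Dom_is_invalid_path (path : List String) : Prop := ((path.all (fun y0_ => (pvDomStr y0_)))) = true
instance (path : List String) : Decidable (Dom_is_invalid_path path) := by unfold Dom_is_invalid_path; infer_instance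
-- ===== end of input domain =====

-- B replaces A's incremental seen-set with early-return membership by a sort-then-adjacent-scan:
-- sort the small caves and report a repeat iff some adjacent pair is equal; objective: alternative.

-- str.islower(s): at least one cased character and every cased character lowercase — exact on the
-- ASCII domain, where the cased characters are exactly 'a'-'z' and 'A'-'Z' (both Pythons call
-- str.islower, so both ports share this helper).
def pyStrIslower (s : String) : Bool :=
  s.toList.any PySem.Chars.islower && s.toList.all (fun c => !PySem.Chars.isupper c)

-- ===== PORT A =====
-- the 'for node in path' loop with state 'small_caves' and the early 'return True'
def isInvalidAuxA : List String → PySem.Set String → Bool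
  | [], _ => false
  | node :: rest, small_caves =>
    if pyStrIslower node then
      if PySem.Set.contains small_caves node then true
      else isInvalidAuxA rest (PySem.Set.add small_caves node)
    else isInvalidAuxA rest small_caves

def is_invalid_path (path : List String) : Bool :=
  isInvalidAuxA path PySem.Set.empty

-- ===== PORT B =====
-- smalls = sorted(n for n in path if str.islower(n)); any(a == b for a, b in zip(smalls, smalls[1:]))
def is_invalid_path_alt (path : List String) : Bool :=
  let smalls := PySem.List.sorted (path.filter pyStrIslower) (fun x => x) false
  (smalls.zip (PySem.List.slice smalls (some 1) none)).any (fun p => p.1 == p.2)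

-- ===== PRECONDITION & SPEC =====
def Spec_is_invalid_path (path : List String) (out : Bool) : Prop := out = is_invalid_path_alt path
instance (path : List String) (out : Bool) : Decidable (Spec_is_invalid_path path out) := by unfold Spec_is_invalid_path; infer_instance

-- ===== CLAIM (what is proved, stated in full; the proofs are below) =====
def Claim_equal_is_invalid_path : Prop := ∀ (path : List String), Dom_is_invalid_path path → Spec_is_invalid_path path (is_invalid_path path)

-- ===== LEMMAS AND PROOFS =====

-- A's loop returns False exactly when the path's small caves are distinct and disjoint from 'seen'.
theorem isInvalidAuxA_eq_false_iff (l : List String) (seen : PySem.Set String) :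
    isInvalidAuxA l seen = false ↔
      (l.filter pyStrIslower).Nodup ∧ ∀ x ∈ l.filter pyStrIslower, x ∉ seen := by
  induction l generalizing seen with
  | nil => simp [isInvalidAuxA]
  | cons n rest ih =>
    by_cases hp : pyStrIslower n
    · by_cases hc : n ∈ seen
      · have hcc : PySem.Set.contains seen n = true := (PySem.Set.contains_iff seen n).mpr hc
        simp only [isInvalidAuxA, hp, if_true, hcc, List.filter_cons, Bool.true_eq_false,
          false_iff, not_and]
        intro _ h
        exact absurd hc (h n (by simp [hp]))
      · have hcc : PySem.Set.contains seen n = false :=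
          Bool.eq_false_iff.mpr (fun h => hc ((PySem.Set.contains_iff seen n).mp h))
        simp only [isInvalidAuxA, hp, if_true, hcc, Bool.false_eq_true, if_false]
        rw [ih]
        simp only [List.filter_cons, hp, if_true, List.nodup_cons, List.mem_cons]
        constructor
        · rintro ⟨hn, hdisj⟩
          refine ⟨⟨fun hmem => ?_, hn⟩, fun x hx => ?_⟩
          · have := hdisj n hmem
            rw [PySem.Set.mem_add] at this
            exact this (Or.inr rfl)
          · rcases hx with rfl | hx'
            · exact hc
            · have := hdisj x hx'
              rw [PySem.Set.mem_add] at this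
              exact fun hxs => this (Or.inl hxs)
        · rintro ⟨⟨hnin, hn⟩, hdisj⟩
          refine ⟨hn, fun x hx => ?_⟩
          rw [PySem.Set.mem_add]
          rintro (hxs | rfl)
          · exact hdisj x (Or.inr hx) hxs
          · exact hnin hx
    · simp only [isInvalidAuxA, hp, Bool.false_eq_true, if_false]
      rw [ih]
      simp [hp]

-- in a ≤-sorted list, an equal adjacent pair exists exactly when the list has a duplicate
theorem adjEq_iff_not_nodup : ∀ (l : List String), l.Pairwise (· ≤ ·) →
    (((l.zip l.tail).any (fun p => p.1 == p.2)) = true ↔ ¬ l.Nodup)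
  | [], _ => by simp
  | [a], _ => by simp
  | a :: b :: t, h => by
    have htail : (b :: t).Pairwise (· ≤ ·) := h.tail
    have ih := adjEq_iff_not_nodup (b :: t) htail
    by_cases hab : a = b
    · subst hab
      simp [List.zip, List.nodup_cons]
    · have hnotmem : a ∉ b :: t := by
        intro hmem
        rcases List.mem_cons.mp hmem with rfl | hmem'
        · exact hab rfl
        · have hat : a ≤ b := (List.pairwise_cons.mp h).1 b List.mem_cons_self
          have hba : b ≤ a := (List.pairwise_cons.mp htail).1 a hmem'
          exact hab (le_antisymm hat hba)
      have : ((a, b) :: (b :: t).zip t).any (fun p => p.1 == p.2) =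
          ((b :: t).zip t).any (fun p => p.1 == p.2) := by
        simp [List.any_cons, hab]
      simp only [List.tail_cons] at ih
      simp only [List.tail_cons, List.zip_cons_cons, this]
      rw [ih]
      simp [List.nodup_cons, hnotmem]

-- ===== VERDICT (by name: the statement is the Claim_ definition above) =====
theorem is_invalid_path_spec : Claim_equal_is_invalid_path := by
  intro path _
  unfold Spec_is_invalid_path is_invalid_path is_invalid_path_alt
  simp only [PySem.List.slice_from_one]
  have hpw : (PySem.List.sorted (path.filter pyStrIslower) (fun x => x) false).Pairwise (· ≤ ·) := by
    simpa using PySem.List.sorted_pairwise (path.filter pyStrIslower) (fun x => x)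
  have hperm := PySem.List.sorted_perm (path.filter pyStrIslower) (fun x => x) false
  have hadj := adjEq_iff_not_nodup _ hpw
  rw [hperm.nodup_iff] at hadj
  by_cases h : isInvalidAuxA path PySem.Set.empty = false
  · have hnd := ((isInvalidAuxA_eq_false_iff path PySem.Set.empty).mp h).1
    rw [h]
    simp only [eq_comm (a := false), ← Bool.not_eq_true]
    intro habs
    exact (hadj.mp habs) hnd
  · have h' : isInvalidAuxA path PySem.Set.empty = true := by
      cases hb : isInvalidAuxA path PySem.Set.empty <;> simp_all
    rw [h']
    have hnd : ¬ (path.filter pyStrIslower).Nodup := fun hnd =>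
      h ((isInvalidAuxA_eq_false_iff path PySem.Set.empty).mpr
        ⟨hnd, by simp [PySem.Set.empty]⟩)
    exact (hadj.mpr hnd).symm
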